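-- pv_equiv track=rewrite | github.com/mikeoborotov/mipt-bioinformatics | problem-20/problem_20.py | get_spectral_convolution_dict
-- ===== SOURCE A (Python) =====
-- def get_spectral_convolution_dict(spectrum):
--     spectrum = sorted(spectrum)
--     convolution_dict = {}
--
--     for i in range(len(spectrum) - 1):
--         for j in range(i, len(spectrum)):
--             mass = spectrum[j] - spectrum[i]
--
--             if mass < 57 or mass > 200:
--                 continue
--
--             if mass in convolution_dict:
--                 convolution_dict[mass] += 1
--
--             else:
--                 convolution_dict[mass] = 1
--
--     return convolution_dict
-- ===== SOURCE B (Python) =====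
-- def _add_row(counts, base, rest):
--     # rest is sorted ascending, so once an element is more than 200 above base,
--     # every later one is too: stop the row early.
--     for x in rest:
--         m = x - base
--         if m > 200:
--             break
--         if m >= 57:
--             counts[m] = counts.get(m, 0) + 1
--     return counts
--
--
-- def get_spectral_convolution_dict(spectrum):
--     s = sorted(spectrum)
--     counts = {}
--     for i, base in enumerate(s):
--         counts = _add_row(counts, base, s[i + 1:])
--     return counts
-- ===== Notes on version B (the rewrite author's own statement) =====
-- stated objective: faster
-- what changed: Instead of scanning every pair (i,j) and filtering, B walks each row of the sorted list only up to the first element more than 200 above the base and breaks there, so rows are output-sensitive instead of O(n) each.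
import Mathlib
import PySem

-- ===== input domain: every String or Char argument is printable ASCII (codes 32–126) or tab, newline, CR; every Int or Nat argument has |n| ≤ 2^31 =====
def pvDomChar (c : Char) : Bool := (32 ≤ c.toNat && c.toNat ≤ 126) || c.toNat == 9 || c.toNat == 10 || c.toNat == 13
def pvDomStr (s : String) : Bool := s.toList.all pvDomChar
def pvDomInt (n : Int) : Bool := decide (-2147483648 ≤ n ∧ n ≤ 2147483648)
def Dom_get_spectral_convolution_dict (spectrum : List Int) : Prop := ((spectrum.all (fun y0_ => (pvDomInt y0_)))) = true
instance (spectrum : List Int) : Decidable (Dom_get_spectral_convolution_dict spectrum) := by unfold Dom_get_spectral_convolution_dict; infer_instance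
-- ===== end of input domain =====

-- B exploits the sortedness A already establishes: each row's scan stops at the first
-- difference above 200 instead of scanning every remaining element (objective: faster).

-- ===== PORT A =====
-- Literal port of A: sort, then nested index loops over all pairs i ≤ j, filtering
-- differences outside [57, 200] and counting the rest in an insertion-ordered dict.
-- Indices i, j are always in range, so pyGetD's default 0 is never used;
-- 'convolution_dict[mass] += 1' runs only under 'mass in convolution_dict'.
def get_spectral_convolution_dict (spectrum : List Int) : List (Int × Int) :=
  let s := PySem.List.sorted spectrum (fun x => x)
  let d :=
    (PySem.List.pyRange 0 (PySem.List.len s - 1)).foldl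
      (fun d i =>
        (PySem.List.pyRange i (PySem.List.len s)).foldl
          (fun d j =>
            let mass := PySem.List.pyGetD s j 0 - PySem.List.pyGetD s i 0
            if mass < 57 ∨ mass > 200 then d
            else if d.contains mass then d.insert mass (d.getD mass 0 + 1)
            else d.insert mass 1)
          d)
      PySem.Dict.empty
  d.items

-- ===== PORT B =====
-- Port of Source B's _add_row: scan the (sorted) rest of the list, stopping ('break')
-- at the first element more than 200 above base.
def pvAddRow (base : Int) : PySem.Dict Int Int → List Int → PySem.Dict Int Int
  | d, [] => d
  | d, x :: rest =>
    if x - base > 200 then d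
    else pvAddRow base
      (if 57 ≤ x - base then d.insert (x - base) (d.getD (x - base) 0 + 1) else d) rest

def get_spectral_convolution_dict_alt (spectrum : List Int) : List (Int × Int) :=
  let s := PySem.List.sorted spectrum (fun x => x)
  ((PySem.List.enumerate s).foldl
      (fun counts p => pvAddRow p.2 counts (PySem.List.slice s (some (p.1 + 1))))
      PySem.Dict.empty).items

-- ===== PRECONDITION & SPEC =====
def Spec_get_spectral_convolution_dict (spectrum : List Int) (out : List (Int × Int)) : Prop := out = get_spectral_convolution_dict_alt spectrum
instance (spectrum : List Int) (out : List (Int × Int)) : Decidable (Spec_get_spectral_convolution_dict spectrum out) := by unfold Spec_get_spectral_convolution_dict; infer_instance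

-- ===== CLAIM (what is proved, stated in full; the proofs are below) =====
def Claim_equal_get_spectral_convolution_dict : Prop := ∀ (spectrum : List Int), Dom_get_spectral_convolution_dict spectrum → Spec_get_spectral_convolution_dict spectrum (get_spectral_convolution_dict spectrum)

-- ===== LEMMAS AND PROOFS =====

-- A's dict-update body collapses: both branches store getD + 1 (absent keys read the default 0).
theorem pv_body_eq (d : PySem.Dict Int Int) (mass : Int) :
    (if mass < 57 ∨ mass > 200 then d
     else if d.contains mass then d.insert mass (d.getD mass 0 + 1)
     else d.insert mass 1) =
    (if mass < 57 ∨ mass > 200 then d else d.insert mass (d.getD mass 0 + 1)) := by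
  by_cases h1 : mass < 57 ∨ mass > 200
  · simp [h1]
  · by_cases h2 : d.contains mass
    · simp [h1, h2]
    · simp only [Bool.not_eq_true] at h2
      simp [h1, h2, PySem.Dict.getD_of_not_contains d 0 h2]

-- On a weakly increasing list, A's filtered fold is B's early-stopping row scan.
theorem pv_break_eq (base : Int) (l : List Int) (hp : l.Pairwise (· ≤ ·)) :
    ∀ d : PySem.Dict Int Int,
      l.foldl (fun d x =>
          if x - base < 57 ∨ x - base > 200 then d
          else d.insert (x - base) (d.getD (x - base) 0 + 1)) d =
      pvAddRow base d l := by
  induction l with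
  | nil => intro d; simp [pvAddRow]
  | cons x rest ih =>
    intro d
    have hx : ∀ y ∈ rest, x ≤ y := fun y hy => List.rel_of_pairwise_cons hp hy
    have hrest : rest.Pairwise (· ≤ ·) := hp.of_cons
    by_cases h200 : x - base > 200
    · -- break: x and everything after it is filtered out on the left, pvAddRow stops.
      simp only [pvAddRow, if_pos h200, List.foldl_cons, if_pos (Or.inr h200)]
      rw [PySem.List.foldl_congr_mem rest _ (fun acc _ => acc) d
        (by
          intro acc y hy
          have : y - base > 200 := by have := hx y hy; omega
          simp [this])]
      simp
    · simp only [pvAddRow, if_neg h200, List.foldl_cons]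
      rw [← ih hrest]
      congr 1
      by_cases h57 : 57 ≤ x - base
      · have : ¬ (x - base < 57 ∨ x - base > 200) := by omega
        simp [this, h57]
      · have : x - base < 57 ∨ x - base > 200 := by omega
        simp [this, h57]

-- A's inner index loop at row i equals B's row scan over the tail past i.
theorem pv_row_eq (s : List Int) (hp : s.Pairwise (· ≤ ·)) (i : Int)
    (h0 : 0 ≤ i) (hn : i.toNat < s.length) (d : PySem.Dict Int Int) :
    (PySem.List.pyRange i (PySem.List.len s)).foldl
      (fun d j =>
        let mass := PySem.List.pyGetD s j 0 - PySem.List.pyGetD s i 0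
        if mass < 57 ∨ mass > 200 then d
        else if d.contains mass then d.insert mass (d.getD mass 0 + 1)
        else d.insert mass 1) d =
    pvAddRow (PySem.List.pyGetD s i 0) d (s.drop (i.toNat + 1)) := by
  simp only [pv_body_eq]
  rw [PySem.List.foldl_pyRange_pyGetD s 0
      (fun d x =>
        if x - PySem.List.pyGetD s i 0 < 57 ∨ x - PySem.List.pyGetD s i 0 > 200 then d
        else d.insert (x - PySem.List.pyGetD s i 0)
          (d.getD (x - PySem.List.pyGetD s i 0) 0 + 1)) d h0]
  rw [List.drop_eq_getElem_cons hn, List.foldl_cons]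
  have hsi : PySem.List.pyGetD s i 0 = s[i.toNat] := by
    rw [PySem.List.pyGetD_of_nonneg s 0 h0, List.getD_eq_getElem s 0 hn]
  have hzero : s[i.toNat] - PySem.List.pyGetD s i 0 < 57 ∨
      s[i.toNat] - PySem.List.pyGetD s i 0 > 200 := by
    rw [hsi]; omega
  rw [if_pos hzero]
  exact pv_break_eq (PySem.List.pyGetD s i 0) (s.drop (i.toNat + 1))
    (List.Pairwise.sublist (List.drop_sublist _ _) hp) d

-- ===== VERDICT (by name: the statement is the Claim_ definition above) =====
theorem get_spectral_convolution_dict_spec : Claim_equal_get_spectral_convolution_dict := by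
  intro spectrum _
  unfold Spec_get_spectral_convolution_dict
  unfold get_spectral_convolution_dict get_spectral_convolution_dict_alt
  dsimp only
  set s := PySem.List.sorted spectrum (fun x => x) with hs
  have hp : s.Pairwise (· ≤ ·) := PySem.List.sorted_pairwise spectrum (fun x => x)
  have hlen : PySem.List.len s = (s.length : Int) := PySem.List.len_eq s
  -- both folds become the same fold of pvAddRow rows over index ranges
  have hB : (PySem.List.enumerate s).foldl
      (fun counts p => pvAddRow p.2 counts (PySem.List.slice s (some (p.1 + 1))))
      PySem.Dict.empty =
      (PySem.List.pyRange 0 (PySem.List.len s)).foldl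
        (fun d j => pvAddRow (PySem.List.pyGetD s j 0) d (s.drop (j.toNat + 1)))
        PySem.Dict.empty := by
    rw [PySem.List.enumerate_eq_map_pyRange s 0, List.foldl_map]
    apply PySem.List.foldl_congr_mem
    intro acc j hj
    rw [PySem.List.mem_pyRange_one] at hj
    have h1 : (0:Int) ≤ j + 1 := by omega
    rw [PySem.List.slice_from s h1]
    have : (j + 1).toNat = j.toNat + 1 := by omega
    rw [this]
  have hA : (PySem.List.pyRange 0 (PySem.List.len s - 1)).foldl
      (fun d i =>
        (PySem.List.pyRange i (PySem.List.len s)).foldl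
          (fun d j =>
            let mass := PySem.List.pyGetD s j 0 - PySem.List.pyGetD s i 0
            if mass < 57 ∨ mass > 200 then d
            else if d.contains mass then d.insert mass (d.getD mass 0 + 1)
            else d.insert mass 1) d)
      PySem.Dict.empty =
      (PySem.List.pyRange 0 (PySem.List.len s - 1)).foldl
        (fun d i => pvAddRow (PySem.List.pyGetD s i 0) d (s.drop (i.toNat + 1)))
        PySem.Dict.empty := by
    apply PySem.List.foldl_congr_mem
    intro acc i hi
    rw [PySem.List.mem_pyRange_one, hlen] at hi
    exact pv_row_eq s hp i hi.1 (by omega) acc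
  rw [hB, hA]
  -- B's range has one extra final index, whose row is past the end of the list: a no-op.
  rcases Nat.eq_zero_or_pos s.length with h0 | h0
  · rw [hlen, h0]
    rw [PySem.List.pyRange_one_eq_nil (by norm_num), PySem.List.pyRange_one_eq_nil (by norm_num)]
  · have hsplit : PySem.List.pyRange 0 (PySem.List.len s) =
        PySem.List.pyRange 0 (PySem.List.len s - 1) ++ [PySem.List.len s - 1] := by
      have : PySem.List.len s = (PySem.List.len s - 1) + 1 := by omega
      rw [this, PySem.List.pyRange_one_succ_right (by rw [hlen]; omega)]
      simp
    rw [hsplit, List.foldl_append, List.foldl_cons, List.foldl_nil]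
    have hdrop : s.drop ((PySem.List.len s - 1).toNat + 1) = [] := by
      apply List.drop_eq_nil_of_le
      rw [hlen]; omega
    rw [hdrop]
    rfl
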